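-- pv_equiv track=rewrite | github.com/ROAD2018/Denoising-Autoencoder | soil_moisture_analysis/hourly_analysis.py | get_modified_seq_end_date
-- ===== SOURCE A (Python) =====
-- def get_modified_seq_end_date(seq_gaps, end_gap):
--     end_seq = None
--     for i in range(end_gap, len(seq_gaps)):
--         if seq_gaps[i][0] < 45:
--             if i < len(seq_gaps) - 1:
--                 end_seq = seq_gaps[i + 1][1]
--             else:
--                 end_seq = seq_gaps[i][2]
--         else:
--             return end_seq
--     return end_seq
-- ===== SOURCE B (Python) =====
-- def get_modified_seq_end_date(seq_gaps, end_gap):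
--     n = len(seq_gaps)
--     f = next((i for i in range(end_gap, n) if seq_gaps[i][0] >= 45), n)
--     if end_gap >= n or f == end_gap:
--         return None
--     if f < n:
--         return seq_gaps[f][1]
--     return seq_gaps[n - 1][2]
-- ===== Notes on version B (the rewrite author's own statement) =====
-- stated objective: simpler
-- what changed: B replaces A's loop that keeps overwriting a running end_seq variable (with an early return) by a find-the-first-boundary step (next() over a generator) followed by one closed-form case analysis on that index.
import Mathlib
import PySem

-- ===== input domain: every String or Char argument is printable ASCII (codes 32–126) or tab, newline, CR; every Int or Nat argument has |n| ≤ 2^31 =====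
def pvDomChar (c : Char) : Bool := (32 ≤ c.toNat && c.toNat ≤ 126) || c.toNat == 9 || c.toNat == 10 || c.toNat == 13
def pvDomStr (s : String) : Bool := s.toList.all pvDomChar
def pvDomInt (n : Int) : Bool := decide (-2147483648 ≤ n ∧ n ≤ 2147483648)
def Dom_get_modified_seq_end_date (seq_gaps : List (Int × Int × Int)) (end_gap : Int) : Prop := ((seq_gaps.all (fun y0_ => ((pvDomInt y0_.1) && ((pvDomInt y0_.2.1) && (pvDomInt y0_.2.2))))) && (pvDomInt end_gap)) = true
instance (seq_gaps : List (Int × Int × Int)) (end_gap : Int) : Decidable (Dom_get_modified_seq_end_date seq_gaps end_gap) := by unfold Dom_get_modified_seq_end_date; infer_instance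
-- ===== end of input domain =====

-- B replaces A's running overwrite of end_seq with find-first-boundary + one closed-form step (objective: simpler).

-- ===== PORT A =====
-- A's loop with early return: structural recursion over the index list, carrying end_seq.
def pvLoopA (seq_gaps : List (Int × Int × Int)) : List Int → Option Int → Option Int
  | [], end_seq => end_seq
  | i :: rest, end_seq =>
    let g := (PySem.List.pyGet? seq_gaps i).getD (0, 0, 0)   -- under Pre_ the index is always in range
    if g.1 < 45 then
      let end_seq' :=
        if i < (seq_gaps.length : Int) - 1 then
          some ((PySem.List.pyGet? seq_gaps (i + 1)).getD (0, 0, 0)).2.1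
        else
          some g.2.2
      pvLoopA seq_gaps rest end_seq'
    else end_seq

def get_modified_seq_end_date (seq_gaps : List (Int × Int × Int)) (end_gap : Int) : Option Int :=
  pvLoopA seq_gaps (PySem.List.pyRange end_gap seq_gaps.length 1) none

-- ===== PORT B =====
def get_modified_seq_end_date_alt (seq_gaps : List (Int × Int × Int)) (end_gap : Int) : Option Int :=
  let n : Int := seq_gaps.length
  let f : Int := ((PySem.List.pyRange end_gap n 1).find?
      (fun i => 45 ≤ ((PySem.List.pyGet? seq_gaps i).getD (0, 0, 0)).1)).getD n
  if end_gap ≥ n then none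
  else if f = end_gap then none
  else if f < n then some ((PySem.List.pyGet? seq_gaps f).getD (0, 0, 0)).2.1
  else some ((PySem.List.pyGet? seq_gaps (n - 1)).getD (0, 0, 0)).2.2

-- ===== PRECONDITION & SPEC =====
-- Pre_ excludes exactly the inputs where A raises IndexError: end_gap < -len(seq_gaps)
-- (then the first loop index is out of range); B raises there too.
def Pre_get_modified_seq_end_date (seq_gaps : List (Int × Int × Int)) (end_gap : Int) : Prop :=
  -(seq_gaps.length : Int) ≤ end_gap
instance (seq_gaps : List (Int × Int × Int)) (end_gap : Int) : Decidable (Pre_get_modified_seq_end_date seq_gaps end_gap) := by unfold Pre_get_modified_seq_end_date; infer_instance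

def pvWitness_get_modified_seq_end_date : (List (Int × Int × Int)) × Int := ([(10, 3, 4), (50, 5, 6)], 0)

def Spec_get_modified_seq_end_date (seq_gaps : List (Int × Int × Int)) (end_gap : Int) (out : Option Int) : Prop := out = get_modified_seq_end_date_alt seq_gaps end_gap
instance (seq_gaps : List (Int × Int × Int)) (end_gap : Int) (out : Option Int) : Decidable (Spec_get_modified_seq_end_date seq_gaps end_gap out) := by unfold Spec_get_modified_seq_end_date; infer_instance

-- ===== CLAIM (what is proved, stated in full; the proofs are below) =====
def Claim_equal_get_modified_seq_end_date : Prop := ∀ (seq_gaps : List (Int × Int × Int)) (end_gap : Int), Dom_get_modified_seq_end_date seq_gaps end_gap → Pre_get_modified_seq_end_date seq_gaps end_gap → Spec_get_modified_seq_end_date seq_gaps end_gap (get_modified_seq_end_date seq_gaps end_gap)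

-- ===== LEMMAS AND PROOFS =====

-- Invariant: A's loop from any valid start a, with any accumulator acc, equals B's
-- find-then-closed-form answer (with acc where the loop never ran / never overwrote).
theorem pvLoopA_eq_aux (seq_gaps : List (Int × Int × Int)) :
    ∀ (k : Nat) (a : Int) (acc : Option Int), -(seq_gaps.length : Int) ≤ a →
    ((seq_gaps.length : Int) - a).toNat = k →
    pvLoopA seq_gaps (PySem.List.pyRange a seq_gaps.length 1) acc =
      (if a ≥ (seq_gaps.length : Int) then acc
       else if ((PySem.List.pyRange a (seq_gaps.length : Int) 1).find?
           (fun i => 45 ≤ ((PySem.List.pyGet? seq_gaps i).getD (0, 0, 0)).1)).getD (seq_gaps.length : Int) = a then acc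
       else if ((PySem.List.pyRange a (seq_gaps.length : Int) 1).find?
           (fun i => 45 ≤ ((PySem.List.pyGet? seq_gaps i).getD (0, 0, 0)).1)).getD (seq_gaps.length : Int) < (seq_gaps.length : Int) then
         some ((PySem.List.pyGet? seq_gaps (((PySem.List.pyRange a (seq_gaps.length : Int) 1).find?
           (fun i => 45 ≤ ((PySem.List.pyGet? seq_gaps i).getD (0, 0, 0)).1)).getD (seq_gaps.length : Int))).getD (0, 0, 0)).2.1
       else some ((PySem.List.pyGet? seq_gaps ((seq_gaps.length : Int) - 1)).getD (0, 0, 0)).2.2) := by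
  intro k
  induction k with
  | zero =>
    intro a acc ha hk
    have hge : (seq_gaps.length : Int) ≤ a := by omega
    rw [PySem.List.pyRange_one_eq_nil hge]
    simp only [pvLoopA]
    rw [if_pos (by omega)]
  | succ k ih =>
    intro a acc ha hk
    have hlt : a < (seq_gaps.length : Int) := by omega
    have hna : ¬ a ≥ (seq_gaps.length : Int) := by omega
    rw [PySem.List.pyRange_one_cons hlt]
    simp only [pvLoopA]
    by_cases hgeq : 45 ≤ ((PySem.List.pyGet? seq_gaps a).getD (0, 0, 0)).1
    · have hfa : List.find? (fun i => decide (45 ≤ ((PySem.List.pyGet? seq_gaps i).getD (0, 0, 0)).1))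
          (a :: PySem.List.pyRange (a + 1) (seq_gaps.length : Int) 1) = some a :=
        List.find?_cons_of_pos (by simpa using hgeq)
      rw [if_neg (by simpa using hgeq), hfa, if_neg hna]
      simp
    · have hfa : List.find? (fun i => decide (45 ≤ ((PySem.List.pyGet? seq_gaps i).getD (0, 0, 0)).1))
          (a :: PySem.List.pyRange (a + 1) (seq_gaps.length : Int) 1) =
          List.find? (fun i => decide (45 ≤ ((PySem.List.pyGet? seq_gaps i).getD (0, 0, 0)).1))
          (PySem.List.pyRange (a + 1) (seq_gaps.length : Int) 1) :=
        List.find?_cons_of_neg (by simpa using hgeq)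
      rw [if_pos (by omega), hfa]
      rw [ih (a + 1) _ (by omega) (by omega)]
      set f := ((PySem.List.pyRange (a+1) (seq_gaps.length : Int) 1).find?
           (fun i => 45 ≤ ((PySem.List.pyGet? seq_gaps i).getD (0, 0, 0)).1)).getD (seq_gaps.length : Int) with hf
      have hfge : a + 1 ≤ f := by
        rcases hfind : (PySem.List.pyRange (a+1) (seq_gaps.length : Int) 1).find?
           (fun i => 45 ≤ ((PySem.List.pyGet? seq_gaps i).getD (0, 0, 0)).1) with _ | x
        · rw [hf, hfind]; simp; omega
        · have hx := List.mem_of_find?_eq_some hfind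
          rw [PySem.List.mem_pyRange_one] at hx
          rw [hf, hfind]; simpa using hx.1
      have hfle : f ≤ (seq_gaps.length : Int) := by
        rcases hfind : (PySem.List.pyRange (a+1) (seq_gaps.length : Int) 1).find?
           (fun i => 45 ≤ ((PySem.List.pyGet? seq_gaps i).getD (0, 0, 0)).1) with _ | x
        · rw [hf, hfind]; simp
        · have hx := List.mem_of_find?_eq_some hfind
          rw [PySem.List.mem_pyRange_one] at hx
          rw [hf, hfind]; simp only [Option.getD_some]; omega
      have hnfa : ¬ f = a := by omega
      rw [if_neg hna, if_neg hnfa]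
      by_cases h1 : a + 1 ≥ (seq_gaps.length : Int)
      · have hfn : f = (seq_gaps.length : Int) := by
          rw [hf, PySem.List.pyRange_one_eq_nil (by omega)]; simp
        rw [if_pos h1, if_neg (show ¬ a < (seq_gaps.length : Int) - 1 by omega),
            if_neg (show ¬ f < (seq_gaps.length : Int) by omega),
            show a = (seq_gaps.length : Int) - 1 by omega]
      · rw [if_neg h1, if_pos (show a < (seq_gaps.length : Int) - 1 by omega)]
        by_cases h2 : f = a + 1
        · rw [if_pos h2, if_pos (show f < (seq_gaps.length : Int) by omega), h2]
        · rw [if_neg h2]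

-- ===== VERDICT (by name: the statement is the Claim_ definition above) =====
theorem get_modified_seq_end_date_spec : Claim_equal_get_modified_seq_end_date := by
  intro seq_gaps end_gap _hDom hPre
  unfold Spec_get_modified_seq_end_date get_modified_seq_end_date get_modified_seq_end_date_alt
  exact pvLoopA_eq_aux seq_gaps (((seq_gaps.length : Int) - end_gap).toNat) end_gap none hPre rfl
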